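-- pv_equiv track=rewrite | github.com/lengthwisehems/retail2 | dl1961_inventory.py | determine_inseam_style
-- ===== SOURCE A (Python) =====
-- from typing import Any, Dict, Iterable, List, Optional, Tuple
--
-- def determine_inseam_style(tags: Iterable[str]) -> str:
--     lower_tags = {t.lower() for t in tags}
--     if any(tag in lower_tags for tag in {"ankle", "filterwomenankle", "length:ankle"}):
--         return "Ankle"
--     if any(tag in lower_tags for tag in {"crop", "cropped", "filterwomencropped", "length:crop"}):
--         return "Cropped"
--     if any(tag in lower_tags for tag in {"length:capri", "capri", "length:knee"}):
--         return "Capri"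
--     return ""
-- ===== SOURCE B (Python) =====
-- _RANK = {
--     "ankle": 0, "filterwomenankle": 0, "length:ankle": 0,
--     "crop": 1, "cropped": 1, "filterwomencropped": 1, "length:crop": 1,
--     "length:capri": 2, "capri": 2, "length:knee": 2,
-- }
-- _STYLES = ["Ankle", "Cropped", "Capri"]
--
-- def determine_inseam_style(tags):
--     best = len(_STYLES)
--     for t in tags:
--         best = min(best, _RANK.get(t.lower(), len(_STYLES)))
--     return _STYLES[best] if best < len(_STYLES) else ""
-- ===== Notes on version B (the rewrite author's own statement) =====
-- stated objective: simpler
-- what changed: Replaces three category-membership scans over a lowered-tag set with one keyword->rank table and a single pass over the tags keeping the minimum rank.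
import Mathlib
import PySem

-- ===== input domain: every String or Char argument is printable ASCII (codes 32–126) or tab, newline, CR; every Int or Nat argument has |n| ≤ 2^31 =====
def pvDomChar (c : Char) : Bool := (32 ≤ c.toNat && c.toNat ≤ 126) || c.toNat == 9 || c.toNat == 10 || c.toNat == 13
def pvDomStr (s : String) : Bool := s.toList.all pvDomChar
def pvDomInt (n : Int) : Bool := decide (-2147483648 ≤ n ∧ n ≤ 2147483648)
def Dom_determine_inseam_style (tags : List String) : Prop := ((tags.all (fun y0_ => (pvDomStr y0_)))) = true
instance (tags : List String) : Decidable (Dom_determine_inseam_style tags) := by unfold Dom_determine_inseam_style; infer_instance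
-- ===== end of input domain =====

-- B replaces A's three category-membership scans by one keyword→rank table and a single
-- min-keeping pass over the tags (objective: simpler). Both are total.

-- ===== PORT A =====
def determine_inseam_style (tags : List String) : String :=
  let lower_tags : PySem.Set String := PySem.Set.ofList (tags.map PySem.Str.lower)
  if (["ankle", "filterwomenankle", "length:ankle"] : List String).any
      (fun tag => PySem.Set.contains lower_tags tag) then "Ankle"
  else if (["crop", "cropped", "filterwomencropped", "length:crop"] : List String).any
      (fun tag => PySem.Set.contains lower_tags tag) then "Cropped"
  else if (["length:capri", "capri", "length:knee"] : List String).any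
      (fun tag => PySem.Set.contains lower_tags tag) then "Capri"
  else ""

-- ===== PORT B =====
def pvRank : PySem.Dict String Nat := PySem.Dict.ofList
  [("ankle", 0), ("filterwomenankle", 0), ("length:ankle", 0),
   ("crop", 1), ("cropped", 1), ("filterwomencropped", 1), ("length:crop", 1),
   ("length:capri", 2), ("capri", 2), ("length:knee", 2)]

def pvStyles : List String := ["Ankle", "Cropped", "Capri"]

def determine_inseam_style_alt (tags : List String) : String :=
  let best := tags.foldl
    (fun b t => min b (pvRank.getD (PySem.Str.lower t) pvStyles.length)) pvStyles.length
  if best < pvStyles.length then pvStyles.getD best "" else ""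

-- ===== PRECONDITION & SPEC =====
def Spec_determine_inseam_style (tags : List String) (out : String) : Prop := out = determine_inseam_style_alt tags
instance (tags : List String) (out : String) : Decidable (Spec_determine_inseam_style tags out) := by unfold Spec_determine_inseam_style; infer_instance

-- ===== CLAIM (what is proved, stated in full; the proofs are below) =====
def Claim_equal_determine_inseam_style : Prop := ∀ (tags : List String), Dom_determine_inseam_style tags → Spec_determine_inseam_style tags (determine_inseam_style tags)

-- ===== LEMMAS AND PROOFS =====


-- pvRank's literal items list (keys distinct, so ofList normalises to the literal dict)
lemma pvRank_eq : pvRank = PySem.Dict.mk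
  [("ankle", 0), ("filterwomenankle", 0), ("length:ankle", 0),
   ("crop", 1), ("cropped", 1), ("filterwomencropped", 1), ("length:crop", 1),
   ("length:capri", 2), ("capri", 2), ("length:knee", 2)] := by decide

-- rank of one lowered tag, as B computes it
def pvR (t : String) : Nat := pvRank.getD (PySem.Str.lower t) 3

lemma pvR_le_three (t : String) : pvR t ≤ 3 := by
  unfold pvR
  rw [pvRank_eq]
  simp only [PySem.Dict.getD_eq_get?_getD, PySem.Dict.get?_mk_cons]
  split_ifs <;> simp [PySem.Dict.get?]

lemma foldl_min_eq (tags : List String) (b : Nat) (hb : b ≤ 3) :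
    tags.foldl (fun b t => min b (pvR t)) b
      = min b (tags.foldl (fun b t => min b (pvR t)) 3) := by
  induction tags generalizing b with
  | nil => simp; omega
  | cons t ts ih =>
    have hr := pvR_le_three t
    simp only [List.foldl_cons]
    rw [ih (min b (pvR t)) (by omega), ih (min 3 (pvR t)) (by omega)]
    omega

set_option maxRecDepth 8192 in
lemma pvR_eq_zero_iff (t : String) :
    pvR t = 0 ↔ (PySem.Str.lower t = "ankle" ∨ PySem.Str.lower t = "filterwomenankle"
      ∨ PySem.Str.lower t = "length:ankle") := by
  unfold pvR
  rw [pvRank_eq]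
  simp only [PySem.Dict.getD_eq_get?_getD, PySem.Dict.get?_mk_cons]
  split_ifs with h1 h2 h3 h4 h5 h6 h7 h8 h9 h10 <;>
    simp_all [PySem.Dict.get?, ne_comm]

set_option maxRecDepth 8192 in
lemma pvR_eq_one_iff (t : String) :
    pvR t = 1 ↔ (PySem.Str.lower t = "crop" ∨ PySem.Str.lower t = "cropped"
      ∨ PySem.Str.lower t = "filterwomencropped" ∨ PySem.Str.lower t = "length:crop") := by
  unfold pvR
  rw [pvRank_eq]
  simp only [PySem.Dict.getD_eq_get?_getD, PySem.Dict.get?_mk_cons]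
  split_ifs with h1 h2 h3 h4 h5 h6 h7 h8 h9 h10 <;>
    simp_all [PySem.Dict.get?, ne_comm] <;>
    first
      | (rw [← h1]; decide) | (rw [← h2]; decide) | (rw [← h3]; decide)

set_option maxRecDepth 8192 in
lemma pvR_eq_two_iff (t : String) :
    pvR t = 2 ↔ (PySem.Str.lower t = "length:capri" ∨ PySem.Str.lower t = "capri"
      ∨ PySem.Str.lower t = "length:knee") := by
  unfold pvR
  rw [pvRank_eq]
  simp only [PySem.Dict.getD_eq_get?_getD, PySem.Dict.get?_mk_cons]
  split_ifs with h1 h2 h3 h4 h5 h6 h7 h8 h9 h10 <;>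
    simp_all [PySem.Dict.get?, ne_comm] <;>
    first
      | (rw [← h1]; decide) | (rw [← h2]; decide) | (rw [← h3]; decide)
      | (rw [← h4]; decide) | (rw [← h5]; decide) | (rw [← h6]; decide)
      | (rw [← h7]; decide)

-- membership of a keyword in the lowered-tag set, as A tests it
lemma contains_ofList_lower (tags : List String) (kw : String) :
    PySem.Set.contains (PySem.Set.ofList (tags.map PySem.Str.lower)) kw
      = tags.any (fun t => PySem.Str.lower t == kw) := by
  rw [Bool.eq_iff_iff]
  simp [PySem.Set.contains, PySem.Set.mem_ofList, List.any_eq_true]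

-- the fold's value, characterised by which ranks occur among the tags
lemma foldl_min_char (tags : List String) :
    tags.foldl (fun b t => min b (pvR t)) 3
      = if tags.any (fun t => pvR t == 0) then 0
        else if tags.any (fun t => pvR t == 1) then 1
        else if tags.any (fun t => pvR t == 2) then 2
        else 3 := by
  induction tags with
  | nil => simp
  | cons t ts ih =>
    have h3 := pvR_le_three t
    simp only [List.foldl_cons, List.any_cons]
    rw [foldl_min_eq ts (min 3 (pvR t)) (by omega), ih]
    have h4 : pvR t = 0 ∨ pvR t = 1 ∨ pvR t = 2 ∨ pvR t = 3 := by omega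
    rcases h4 with h | h | h | h <;> simp only [h] <;>
      cases h0 : ts.any (fun t => pvR t == 0) <;>
      cases h1 : ts.any (fun t => pvR t == 1) <;>
      cases h2 : ts.any (fun t => pvR t == 2) <;>
        simp

-- ===== VERDICT (by name: the statement is the Claim_ definition above) =====
set_option maxHeartbeats 1000000 in
theorem determine_inseam_style_spec : Claim_equal_determine_inseam_style := by
  intro tags _
  unfold Spec_determine_inseam_style determine_inseam_style determine_inseam_style_alt
  have hlen : pvStyles.length = 3 := rfl
  simp only [hlen]
  have hfun : (fun (b : Nat) t => min b (pvRank.getD (PySem.Str.lower t) 3))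
      = (fun b t => min b (pvR t)) := rfl
  rw [hfun, foldl_min_char]
  simp only [List.any_cons, List.any_nil, Bool.or_false, contains_ofList_lower]
  have e0 : (tags.any fun t => pvR t == 0)
      = ((tags.any fun t => PySem.Str.lower t == "ankle")
        || ((tags.any fun t => PySem.Str.lower t == "filterwomenankle")
        || (tags.any fun t => PySem.Str.lower t == "length:ankle"))) := by
    rw [Bool.eq_iff_iff]
    simp only [List.any_eq_true, Bool.or_eq_true, beq_iff_eq, pvR_eq_zero_iff]
    constructor
    · rintro ⟨t, ht, h | h | h⟩
      · exact Or.inl ⟨t, ht, h⟩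
      · exact Or.inr (Or.inl ⟨t, ht, h⟩)
      · exact Or.inr (Or.inr ⟨t, ht, h⟩)
    · rintro (⟨t, ht, h⟩ | ⟨t, ht, h⟩ | ⟨t, ht, h⟩)
      · exact ⟨t, ht, Or.inl h⟩
      · exact ⟨t, ht, Or.inr (Or.inl h)⟩
      · exact ⟨t, ht, Or.inr (Or.inr h)⟩
  have e1 : (tags.any fun t => pvR t == 1)
      = ((tags.any fun t => PySem.Str.lower t == "crop")
        || ((tags.any fun t => PySem.Str.lower t == "cropped")
        || ((tags.any fun t => PySem.Str.lower t == "filterwomencropped")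
        || (tags.any fun t => PySem.Str.lower t == "length:crop")))) := by
    rw [Bool.eq_iff_iff]
    simp only [List.any_eq_true, Bool.or_eq_true, beq_iff_eq, pvR_eq_one_iff]
    constructor
    · rintro ⟨t, ht, h | h | h | h⟩
      · exact Or.inl ⟨t, ht, h⟩
      · exact Or.inr (Or.inl ⟨t, ht, h⟩)
      · exact Or.inr (Or.inr (Or.inl ⟨t, ht, h⟩))
      · exact Or.inr (Or.inr (Or.inr ⟨t, ht, h⟩))
    · rintro (⟨t, ht, h⟩ | ⟨t, ht, h⟩ | ⟨t, ht, h⟩ | ⟨t, ht, h⟩)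
      · exact ⟨t, ht, Or.inl h⟩
      · exact ⟨t, ht, Or.inr (Or.inl h)⟩
      · exact ⟨t, ht, Or.inr (Or.inr (Or.inl h))⟩
      · exact ⟨t, ht, Or.inr (Or.inr (Or.inr h))⟩
  have e2 : (tags.any fun t => pvR t == 2)
      = ((tags.any fun t => PySem.Str.lower t == "length:capri")
        || ((tags.any fun t => PySem.Str.lower t == "capri")
        || (tags.any fun t => PySem.Str.lower t == "length:knee"))) := by
    rw [Bool.eq_iff_iff]
    simp only [List.any_eq_true, Bool.or_eq_true, beq_iff_eq, pvR_eq_two_iff]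
    constructor
    · rintro ⟨t, ht, h | h | h⟩
      · exact Or.inl ⟨t, ht, h⟩
      · exact Or.inr (Or.inl ⟨t, ht, h⟩)
      · exact Or.inr (Or.inr ⟨t, ht, h⟩)
    · rintro (⟨t, ht, h⟩ | ⟨t, ht, h⟩ | ⟨t, ht, h⟩)
      · exact ⟨t, ht, Or.inl h⟩
      · exact ⟨t, ht, Or.inr (Or.inl h)⟩
      · exact ⟨t, ht, Or.inr (Or.inr h)⟩
  rw [e0, e1, e2]
  cases h0 : ((tags.any fun t => PySem.Str.lower t == "ankle")
        || ((tags.any fun t => PySem.Str.lower t == "filterwomenankle")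
        || (tags.any fun t => PySem.Str.lower t == "length:ankle"))) <;>
  cases h1 : ((tags.any fun t => PySem.Str.lower t == "crop")
        || ((tags.any fun t => PySem.Str.lower t == "cropped")
        || ((tags.any fun t => PySem.Str.lower t == "filterwomencropped")
        || (tags.any fun t => PySem.Str.lower t == "length:crop")))) <;>
  cases h2 : ((tags.any fun t => PySem.Str.lower t == "length:capri")
        || ((tags.any fun t => PySem.Str.lower t == "capri")
        || (tags.any fun t => PySem.Str.lower t == "length:knee"))) <;>
    simp [pvStyles]
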